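-- pv_equiv track=rewrite | github.com/bakerbug/Advent-of-Code | 2018/day_2.py | _scan_label
-- ===== SOURCE A (Python) =====
-- from typing import Tuple
--
-- def _scan_label(label: str) -> Tuple:
--     found_double = False
--     found_triple = False
--
--     for character in label:
--         matches = label.count(character)
--         if matches == 2:
--             found_double = True
--         if matches == 3:
--             found_triple = True
--
--     return found_double, found_triple
-- ===== SOURCE B (Python) =====
-- def _scan_label(label):
--     counts = {}
--     for ch in label:
--         counts[ch] = counts.get(ch, 0) + 1
--     values = counts.values()
--     return 2 in values, 3 in values
-- ===== Notes on version B (the rewrite author's own statement) =====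
-- stated objective: faster
-- what changed: Replaces the per-character label.count rescan with a frequency dictionary built in one pass, then tests whether 2 or 3 occurs among its values.
import Mathlib
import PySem

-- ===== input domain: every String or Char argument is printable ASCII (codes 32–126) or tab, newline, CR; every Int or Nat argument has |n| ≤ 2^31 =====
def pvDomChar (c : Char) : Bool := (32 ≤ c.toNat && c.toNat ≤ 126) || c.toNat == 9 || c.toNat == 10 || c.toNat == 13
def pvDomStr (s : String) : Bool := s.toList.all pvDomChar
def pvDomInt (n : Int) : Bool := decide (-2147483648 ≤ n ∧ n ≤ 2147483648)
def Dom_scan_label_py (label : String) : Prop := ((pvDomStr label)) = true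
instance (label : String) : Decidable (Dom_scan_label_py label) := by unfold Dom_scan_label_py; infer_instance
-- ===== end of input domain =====

-- B replaces A's per-character label.count rescan with a frequency dictionary built in one pass,
-- then tests whether 2 or 3 occurs among its values (faster).


-- ===== PORT A =====
-- for character in label: matches = label.count(character); set the flags on 2 / 3
def scan_label_py (label : String) : Bool × Bool :=
  label.toList.foldl
    (fun st character =>
      let m_cnt := PySem.Chars.count label.toList [character]
      let st := if m_cnt == 2 then (true, st.2) else st
      let st := if m_cnt == 3 then (st.1, true) else st
      st)
    (false, false)

-- ===== PORT B =====
-- one-pass frequency dict (counts[ch] = counts.get(ch, 0) + 1 is Dict.modify), then 2/3 ∈ values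
def scan_label_py_alt (label : String) : Bool × Bool :=
  let counts := label.toList.foldl
    (fun d ch => d.modify ch 0 (· + 1)) (PySem.Dict.empty : PySem.Dict Char Int)
  (decide ((2 : Int) ∈ counts.values), decide ((3 : Int) ∈ counts.values))

-- ===== PRECONDITION & SPEC =====
def Spec_scan_label_py (label : String) (out : Bool × Bool) : Prop := out = scan_label_py_alt label
instance (label : String) (out : Bool × Bool) : Decidable (Spec_scan_label_py label out) := by unfold Spec_scan_label_py; infer_instance

-- ===== CLAIM (what is proved, stated in full; the proofs are below) =====
def Claim_equal_scan_label_py : Prop := ∀ (label : String), Dom_scan_label_py label → Spec_scan_label_py label (scan_label_py label)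

-- ===== LEMMAS AND PROOFS =====

-- Python's s.count(c) for a single-character needle is the element count
theorem chars_count_go_singleton (c : Char) (l : List Char) (fuel acc : Nat)
    (h : l.length ≤ fuel) :
    PySem.Chars.count.go [c] fuel l acc = acc + l.count c := by
  induction l generalizing fuel acc with
  | nil => cases fuel <;> simp [PySem.Chars.count.go]
  | cons hd t ih =>
    cases fuel with
    | zero => simp at h
    | succ f =>
      have hf : t.length ≤ f := by simp at h; omega
      by_cases hc : c = hd
      · subst hc
        simp only [PySem.Chars.count.go, List.isPrefixOf, BEq.rfl, Bool.and_self, if_true,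
          List.length_singleton, List.drop_one, List.tail_cons, List.count_cons_self]
        rw [ih f (acc + 1) hf]
        omega
      · have hbe : (c == hd) = false := beq_eq_false_iff_ne.mpr hc
        simp only [PySem.Chars.count.go, List.isPrefixOf, hbe, Bool.false_and,
          List.count_cons_of_ne (Ne.symm hc)]
        exact ih f acc hf

theorem chars_count_singleton (c : Char) (l : List Char) :
    PySem.Chars.count l [c] = l.count c := by
  simp [PySem.Chars.count, chars_count_go_singleton c l l.length 0 le_rfl]

-- A's fold is "some character of the label has count 2 / count 3"
theorem scanA_fold (l t : List Char) (st : Bool × Bool) :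
    t.foldl
      (fun st character =>
        let m_cnt := PySem.Chars.count l [character]
        let st := if m_cnt == 2 then (true, st.2) else st
        let st := if m_cnt == 3 then (st.1, true) else st
        st)
      st
    = (st.1 || t.any (fun c => l.count c == 2), st.2 || t.any (fun c => l.count c == 3)) := by
  induction t generalizing st with
  | nil => simp
  | cons hd t ih =>
    rw [List.foldl_cons, ih]
    dsimp only
    rw [chars_count_singleton]
    by_cases h2 : l.count hd = 2
    · have h3 : l.count hd ≠ 3 := by omega
      have e2 : (l.count hd == 2) = true := by simp [h2]
      have e3 : (l.count hd == 3) = false := by simp [h3]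
      simp [e2, e3]
    · by_cases h3 : l.count hd = 3 <;>
      · have e2 : (l.count hd == 2) = false := by simp [h2]
        first
        | (have e3 : (l.count hd == 3) = true := by simp [h3]
           simp [e2, e3])
        | (have e3 : (l.count hd == 3) = false := by simp [h3]
           simp [e2, e3])

-- B's dict fold is PySem.Dict.counter; its values are the counts of the distinct chars
theorem scanB_values (l : List Char) :
    (l.foldl (fun d ch => d.modify ch 0 (· + 1)) (PySem.Dict.empty : PySem.Dict Char Int)).values
    = (PySem.Set.ofList l).map (fun k => ((l.count k : Int))) := by
  rw [← PySem.Dict.counter_eq_foldl]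
  simp only [PySem.Dict.values, PySem.Dict.items_counter, List.map_map]
  rfl

-- "n in counts.values()" is A's any-test
theorem counts_decide (l : List Char) (n : Nat) :
    (decide (((n : Int)) ∈ (PySem.Set.ofList l).map (fun k => ((l.count k : Int)))))
      = l.any (fun c => l.count c == n) := by
  rw [Bool.eq_iff_iff]
  simp only [decide_eq_true_eq, List.any_eq_true, beq_iff_eq, List.mem_map, PySem.Set.mem_ofList]
  constructor
  · rintro ⟨c, hc, h⟩; exact ⟨c, hc, by exact_mod_cast h⟩
  · rintro ⟨c, hc, h⟩; exact ⟨c, hc, by exact_mod_cast h⟩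

-- ===== VERDICT (by name: the statement is the Claim_ definition above) =====
theorem scan_label_py_spec : Claim_equal_scan_label_py := by
  intro label _
  unfold Spec_scan_label_py scan_label_py scan_label_py_alt
  rw [scanA_fold label.toList label.toList (false, false)]
  dsimp only
  rw [scanB_values label.toList]
  have h2 := counts_decide label.toList 2
  have h3 := counts_decide label.toList 3
  push_cast at h2 h3
  simp only [Bool.false_or, Prod.mk.injEq]
  exact ⟨h2.symm, h3.symm⟩
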